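-- pv_equiv track=rewrite | github.com/hyeinisfree/kings-algorithm-study | seungmi/week10/n으로표현.py | solution
-- ===== SOURCE A (Python) =====
-- def solution(N, number):
--
--     if N==number:
--         return 1
--
--     s=[set() for x in range(8)]
--
--     for i,s_set in enumerate(s, start=1):
--         s_set.add(int(str(N)*i))
--
--     for i in range(1, 8):
--         for j in range(i):
--             for op1 in s[j]:
--                 for op2 in s[i-j-1]:
--                     s[i].add(op1 + op2)
--                     s[i].add(op1 - op2)
--                     s[i].add(op1 * op2)
--                     if op2 != 0:
--                         s[i].add(op1 // op2)
--
--         if  number in s[i]: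
--             answer = i + 1
--             break
--
--     else:
--         answer = -1
--
--     return answer
-- ===== SOURCE B (Python) =====
-- def solution(N, number):
--     memo = {}
--     def reachable(c):
--         if c in memo:
--             return memo[c]
--         vals = {int(str(N) * c)}
--         for j in range(1, c // 2 + 1):
--             left, right = reachable(j), reachable(c - j)
--             vals |= {a + b for a in left for b in right}
--             vals |= {a - b for a in left for b in right}
--             vals |= {b - a for a in left for b in right}
--             vals |= {a * b for a in left for b in right}
--             vals |= {a // b for a in left for b in right if b != 0}
--             vals |= {b // a for a in left for b in right if a != 0}
--         memo[c] = vals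
--         return vals
--     for c in range(1, 9):
--         if number in reachable(c):
--             return c
--     return -1
-- ===== Notes on version B (the rewrite author's own statement) =====
-- stated objective: alternative
-- what changed: Replaces A's in-place 8-slot table with nested element loops and a break/else search by a self-contained recursive helper reachable(c) that rebuilds the set of values expressible with exactly c copies of N from its split counts via set comprehensions and unions, folding A's N==number special case into the c=1 check of a plain search loop.
import Mathlib
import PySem

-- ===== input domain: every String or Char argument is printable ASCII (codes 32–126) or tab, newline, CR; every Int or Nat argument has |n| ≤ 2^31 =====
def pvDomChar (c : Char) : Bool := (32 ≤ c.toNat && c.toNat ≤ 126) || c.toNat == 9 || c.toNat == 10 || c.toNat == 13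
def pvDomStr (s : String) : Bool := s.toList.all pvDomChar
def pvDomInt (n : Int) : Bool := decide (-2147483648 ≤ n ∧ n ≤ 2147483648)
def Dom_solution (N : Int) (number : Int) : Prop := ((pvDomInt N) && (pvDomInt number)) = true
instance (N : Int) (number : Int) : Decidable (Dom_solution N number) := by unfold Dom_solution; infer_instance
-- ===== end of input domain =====

-- B re-implements A's bottom-up 8-slot table search as a memoized recursive helper reachable(c)
-- (sets built by comprehensions/unions per split count); equivalence of return values is proved
-- on Pre_solution (A raises ValueError on N < 0 with N ≠ number, and so does B).


-- ===== PORT A =====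
-- hand port of int(str(N)*c) (both Pythons contain this subexpression):
-- for 0 ≤ N it is the value of c decimal blocks of N, each of width len(str(N)) =
-- (Nat.toDigits 10 N.toNat).length — exact on that domain; for N < 0 Python raises
-- ValueError when c ≥ 2 (excluded by Pre_solution), and for c = 1 returns N itself.
def pvConcat (N : Int) (c : Nat) : Int :=
  if 0 ≤ N then
    (List.range c).foldl (fun v _ => v * (10 : Int) ^ (Nat.toDigits 10 N.toNat).length + N) 0
  else N

-- A's two inner loops: for op1 in s[j]: for op2 in s[i-j-1]: add the four results
def pvAddOps (acc : PySem.Set Int) (op1 : Int) (right : List Int) : PySem.Set Int :=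
  right.foldl (fun acc op2 =>
    let acc := PySem.Set.add acc (op1 + op2)
    let acc := PySem.Set.add acc (op1 - op2)
    let acc := PySem.Set.add acc (op1 * op2)
    if op2 ≠ 0 then PySem.Set.add acc (PySem.Int.floordiv op1 op2) else acc) acc

def pvCombine (acc : PySem.Set Int) (left right : List Int) : PySem.Set Int :=
  left.foldl (fun acc op1 => pvAddOps acc op1 right) acc

-- A's 'for i in range(1, 8): … break / else: answer = -1' over the remaining indices,
-- carrying the mutable list s of 8 sets
def pvALoop (number : Int) (s : List (PySem.Set Int)) : List Nat → Int
  | [] => -1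
  | i :: rest =>
    let si := (List.range i).foldl
      (fun acc j => pvCombine acc (s.getD j []) (s.getD (i - j - 1) [])) (s.getD i [])
    if number ∈ si then (i : Int) + 1
    else pvALoop number (s.set i si) rest

def solution (N : Int) (number : Int) : Int :=
  if N = number then 1
  else
    pvALoop number
      ((List.range 8).map (fun k => PySem.Set.add PySem.Set.empty (pvConcat N (k + 1))))
      (List.range' 1 7)

-- ===== PORT B =====
-- the six comprehension unions of Source B's loop body (both orientations of each split
-- pair); Set.union itself performs set(t) on its second argument, so each comprehension
-- set {…} is passed as its element list
def pvUnions (vals : PySem.Set Int) (left right : List Int) : PySem.Set Int :=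
  let vals := PySem.Set.union vals (left.flatMap fun a => right.map fun b => a + b)
  let vals := PySem.Set.union vals (left.flatMap fun a => right.map fun b => a - b)
  let vals := PySem.Set.union vals (left.flatMap fun a => right.map fun b => b - a)
  let vals := PySem.Set.union vals (left.flatMap fun a => right.map fun b => a * b)
  let vals := PySem.Set.union vals (left.flatMap fun a =>
    (right.filter fun b => b != 0).map fun b => PySem.Int.floordiv a b)
  PySem.Set.union vals ((left.filter fun a => a != 0).flatMap fun a =>
    right.map fun b => PySem.Int.floordiv b a)

-- Source B's recursive reachable(c); the closure's mutable memo dict is threaded through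
-- explicitly as state, and the structural fuel argument (every call keeps c ≤ fuel,
-- recursive calls have split counts ≤ fuel - 1) is only a totality guard
def pvReachM (N : Int) : Nat → Nat → PySem.Dict Nat (PySem.Set Int) →
    PySem.Set Int × PySem.Dict Nat (PySem.Set Int)
  | 0, _, memo => ([], memo)
  | fuel + 1, c, memo =>
    match memo.get? c with
    | some v => (v, memo)
    | none =>
      let p := (List.range' 1 (c / 2)).foldl
        (fun (p : PySem.Set Int × PySem.Dict Nat (PySem.Set Int)) j =>
          (pvUnions p.1 (pvReachM N fuel j p.2).1
             (pvReachM N fuel (c - j) (pvReachM N fuel j p.2).2).1,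
           (pvReachM N fuel (c - j) (pvReachM N fuel j p.2).2).2))
        (PySem.Set.add PySem.Set.empty (pvConcat N c), memo)
      (p.1, p.2.insert c p.1)

-- Source B's 'for c in range(1, 9): … return c / return -1', threading the memo
def pvBLoop (N : Int) (number : Int) (memo : PySem.Dict Nat (PySem.Set Int)) : List Nat → Int
  | [] => -1
  | c :: rest =>
    let p := pvReachM N c c memo
    if number ∈ p.1 then (c : Int) else pvBLoop N number p.2 rest

def solution_alt (N : Int) (number : Int) : Int :=
  pvBLoop N number PySem.Dict.empty (List.range' 1 8)

-- ===== PRECONDITION & SPEC =====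
-- A raises ValueError (int('-5-5') from int(str(N)*i), i ≥ 2) whenever N < 0 and N ≠ number;
-- on every other input A returns. B raises on exactly the same inputs.
def Pre_solution (N : Int) (number : Int) : Prop := 0 ≤ N ∨ N = number
instance (N : Int) (number : Int) : Decidable (Pre_solution N number) := by
  unfold Pre_solution; infer_instance
def pvWitness_solution : Int × Int := (5, 26)

def Spec_solution (N : Int) (number : Int) (out : Int) : Prop := out = solution_alt N number
instance (N : Int) (number : Int) (out : Int) : Decidable (Spec_solution N number out) := by
  unfold Spec_solution; infer_instance

-- ===== CLAIM (what is proved, stated in full; the proofs are below) =====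
def Claim_equal_solution : Prop := ∀ (N : Int) (number : Int), Dom_solution N number → Pre_solution N number → Spec_solution N number (solution N number)

-- ===== LEMMAS AND PROOFS =====

-- the value relation produced by one (op1, op2) pair in either program
def pvOp (a b x : Int) : Prop :=
  x = a + b ∨ x = a - b ∨ x = a * b ∨ (b ≠ 0 ∧ x = PySem.Int.floordiv a b)

def pvOp2 (a b x : Int) : Prop := pvOp a b x ∨ pvOp b a x

-- spec-only: all four operation results of the ordered pairs of one split
def pvUnion4 (vals : PySem.Set Int) (left right : List Int) : PySem.Set Int :=
  let vals := PySem.Set.union vals (left.flatMap fun a => right.map fun b => a + b)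
  let vals := PySem.Set.union vals (left.flatMap fun a => right.map fun b => a - b)
  let vals := PySem.Set.union vals (left.flatMap fun a => right.map fun b => a * b)
  PySem.Set.union vals (left.flatMap fun a =>
    (right.filter fun b => b != 0).map fun b => PySem.Int.floordiv a b)

-- memo-free specification of Source B's reachable(c), over all ordered splits: the same recursion on the pure set
def pvReach (N : Int) (c : Nat) : PySem.Set Int :=
  (List.range' 1 (c - 1)).attach.foldl
    (fun vals jh => pvUnion4 vals (pvReach N jh.1) (pvReach N (c - jh.1)))
    (PySem.Set.add PySem.Set.empty (pvConcat N c))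
termination_by c
decreasing_by
  all_goals
    rcases List.mem_range'_1.mp jh.2 with ⟨h1, h2⟩
    omega

lemma pvConcat_one (N : Int) : pvConcat N 1 = N := by
  unfold pvConcat; split <;> simp

lemma mem_pvAddOps (acc : PySem.Set Int) (a : Int) (R : List Int) (x : Int) :
    x ∈ pvAddOps acc a R ↔ x ∈ acc ∨ ∃ b ∈ R, pvOp a b x := by
  induction R generalizing acc with
  | nil => simp [pvAddOps]
  | cons b R ih =>
    show x ∈ pvAddOps _ a R ↔ _
    rw [ih]
    by_cases hb : b = 0 <;> simp [PySem.Set.mem_add, pvOp, hb] <;> aesop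

lemma mem_pvCombine (acc : PySem.Set Int) (L R : List Int) (x : Int) :
    x ∈ pvCombine acc L R ↔ x ∈ acc ∨ ∃ a ∈ L, ∃ b ∈ R, pvOp a b x := by
  induction L generalizing acc with
  | nil => simp [pvCombine]
  | cons a L ih =>
    show x ∈ pvCombine (pvAddOps acc a R) L R ↔ _
    rw [ih, mem_pvAddOps]
    simp only [List.mem_cons]
    aesop

lemma mem_foldl_combine (F G : Nat → List Int) (js : List Nat) (init : PySem.Set Int) (x : Int) :
    x ∈ js.foldl (fun acc j => pvCombine acc (F j) (G j)) init ↔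
      x ∈ init ∨ ∃ j ∈ js, ∃ a ∈ F j, ∃ b ∈ G j, pvOp a b x := by
  induction js generalizing init with
  | nil => simp
  | cons j js ih =>
    rw [List.foldl_cons, ih, mem_pvCombine]
    simp only [List.mem_cons]
    aesop

lemma mem_pvUnion4 (vals : PySem.Set Int) (L R : List Int) (x : Int) :
    x ∈ pvUnion4 vals L R ↔ x ∈ vals ∨ ∃ a ∈ L, ∃ b ∈ R, pvOp a b x := by
  simp only [pvUnion4, PySem.Set.mem_union, List.mem_flatMap,
    List.mem_map, List.mem_filter, pvOp, bne_iff_ne, ne_eq]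
  constructor
  · rintro ((((h | ⟨a, ha, b, hb, rfl⟩) | ⟨a, ha, b, hb, rfl⟩) | ⟨a, ha, b, hb, rfl⟩) |
      ⟨a, ha, b, ⟨hb, hb0⟩, rfl⟩)
    · exact Or.inl h
    · exact Or.inr ⟨a, ha, b, hb, Or.inl rfl⟩
    · exact Or.inr ⟨a, ha, b, hb, Or.inr (Or.inl rfl)⟩
    · exact Or.inr ⟨a, ha, b, hb, Or.inr (Or.inr (Or.inl rfl))⟩
    · exact Or.inr ⟨a, ha, b, hb, Or.inr (Or.inr (Or.inr ⟨hb0, rfl⟩))⟩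
  · rintro (h | ⟨a, ha, b, hb, (rfl | rfl | rfl | ⟨hb0, rfl⟩)⟩)
    · exact Or.inl (Or.inl (Or.inl (Or.inl h)))
    · exact Or.inl (Or.inl (Or.inl (Or.inr ⟨a, ha, b, hb, rfl⟩)))
    · exact Or.inl (Or.inl (Or.inr ⟨a, ha, b, hb, rfl⟩))
    · exact Or.inl (Or.inr ⟨a, ha, b, hb, rfl⟩)
    · exact Or.inr ⟨a, ha, b, ⟨hb, hb0⟩, rfl⟩

lemma mem_pvUnions (vals : PySem.Set Int) (L R : List Int) (x : Int) :
    x ∈ pvUnions vals L R ↔ x ∈ vals ∨ ∃ a ∈ L, ∃ b ∈ R, pvOp2 a b x := by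
  simp only [pvUnions, PySem.Set.mem_union, List.mem_flatMap,
    List.mem_map, List.mem_filter, pvOp2, pvOp, bne_iff_ne, ne_eq]
  constructor
  · rintro ((((((h | ⟨a, ha, b, hb, rfl⟩) | ⟨a, ha, b, hb, rfl⟩) | ⟨a, ha, b, hb, rfl⟩) |
      ⟨a, ha, b, hb, rfl⟩) | ⟨a, ha, b, ⟨hb, hb0⟩, rfl⟩) | ⟨a, ⟨ha, ha0⟩, b, hb, rfl⟩)
    · exact Or.inl h
    · exact Or.inr ⟨a, ha, b, hb, Or.inl (Or.inl rfl)⟩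
    · exact Or.inr ⟨a, ha, b, hb, Or.inl (Or.inr (Or.inl rfl))⟩
    · exact Or.inr ⟨a, ha, b, hb, Or.inr (Or.inr (Or.inl rfl))⟩
    · exact Or.inr ⟨a, ha, b, hb, Or.inl (Or.inr (Or.inr (Or.inl rfl)))⟩
    · exact Or.inr ⟨a, ha, b, hb, Or.inl (Or.inr (Or.inr (Or.inr ⟨hb0, rfl⟩)))⟩
    · exact Or.inr ⟨a, ha, b, hb, Or.inr (Or.inr (Or.inr (Or.inr ⟨ha0, rfl⟩)))⟩
  · rintro (h | ⟨a, ha, b, hb,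
      ((rfl | rfl | rfl | ⟨hb0, rfl⟩) | (rfl | rfl | rfl | ⟨ha0, rfl⟩))⟩)
    · exact Or.inl (Or.inl (Or.inl (Or.inl (Or.inl (Or.inl h)))))
    · exact Or.inl (Or.inl (Or.inl (Or.inl (Or.inl (Or.inr ⟨a, ha, b, hb, rfl⟩)))))
    · exact Or.inl (Or.inl (Or.inl (Or.inl (Or.inr ⟨a, ha, b, hb, rfl⟩))))
    · exact Or.inl (Or.inl (Or.inr ⟨a, ha, b, hb, rfl⟩))
    · exact Or.inl (Or.inr ⟨a, ha, b, ⟨hb, hb0⟩, rfl⟩)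
    · exact Or.inl (Or.inl (Or.inl (Or.inl (Or.inl (Or.inr ⟨a, ha, b, hb, (Int.add_comm a b)⟩)))))
    · exact Or.inl (Or.inl (Or.inl (Or.inr ⟨a, ha, b, hb, rfl⟩)))
    · exact Or.inl (Or.inl (Or.inr ⟨a, ha, b, hb, (Int.mul_comm a b)⟩))
    · exact Or.inr ⟨a, ⟨ha, ha0⟩, b, hb, rfl⟩

lemma mem_foldl_union4 (F G : Nat → List Int) (js : List Nat) (init : PySem.Set Int) (x : Int) :
    x ∈ js.foldl (fun vals j => pvUnion4 vals (F j) (G j)) init ↔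
      x ∈ init ∨ ∃ j ∈ js, ∃ a ∈ F j, ∃ b ∈ G j, pvOp a b x := by
  induction js generalizing init with
  | nil => simp
  | cons j js ih =>
    rw [List.foldl_cons, ih, mem_pvUnion4]
    simp only [List.mem_cons]
    aesop

lemma mem_pvReach (N : Int) (c : Nat) (x : Int) :
    x ∈ pvReach N c ↔
      x = pvConcat N c ∨
        ∃ j, 1 ≤ j ∧ j < c ∧ ∃ a ∈ pvReach N j, ∃ b ∈ pvReach N (c - j), pvOp a b x := by
  rw [pvReach]
  rw [List.foldl_attach (l := List.range' 1 (c - 1))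
    (f := fun vals j => pvUnion4 vals (pvReach N j) (pvReach N (c - j)))]
  rw [mem_foldl_union4 (fun j => pvReach N j) (fun j => pvReach N (c - j))]
  have hmem : ∀ y : Int, y ∈ PySem.Set.add PySem.Set.empty (pvConcat N c) ↔ y = pvConcat N c := by
    intro y; simp [PySem.Set.empty]
  rw [hmem]
  constructor
  · rintro (h | ⟨j, hj, rest⟩)
    · exact Or.inl h
    · rcases List.mem_range'_1.mp hj with ⟨h1, h2⟩
      exact Or.inr ⟨j, h1, by omega, rest⟩
  · rintro (h | ⟨j, h1, h2, rest⟩)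
    · exact Or.inl h
    · exact Or.inr ⟨j, List.mem_range'_1.mpr ⟨h1, by omega⟩, rest⟩

-- the memo dict always caches sets with the membership of the pure recursion
def pvGood (N : Int) (memo : PySem.Dict Nat (PySem.Set Int)) : Prop :=
  ∀ c v, memo.get? c = some v → ∀ x : Int, x ∈ v ↔ x ∈ pvReach N c

lemma pvGood_insert (N : Int) (c : Nat) (S : PySem.Set Int)
    (memo : PySem.Dict Nat (PySem.Set Int))
    (hS : ∀ x : Int, x ∈ S ↔ x ∈ pvReach N c) (hmemo : pvGood N memo) :
    pvGood N (memo.insert c S) := by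
  intro c' v' hg x
  by_cases hcc : c = c'
  · subst hcc
    rw [PySem.Dict.get?_insert_self] at hg
    cases hg
    exact hS x
  · rw [PySem.Dict.get?_insert_of_ne _ _ (fun h => hcc h.symm)] at hg
    exact hmemo c' v' hg x

-- generic invariant for a fold whose state is (value set, memo)
lemma foldl_step_inv {α β : Type} (Gd : β → Prop) (Q : α → Int → Prop)
    (f : PySem.Set Int × β → α → PySem.Set Int × β) :
    ∀ (l : List α),
      (∀ p a, a ∈ l → Gd p.2 → Gd (f p a).2 ∧ ∀ x : Int, x ∈ (f p a).1 ↔ x ∈ p.1 ∨ Q a x) →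
      ∀ p, Gd p.2 →
        Gd (l.foldl f p).2 ∧
          ∀ x : Int, x ∈ (l.foldl f p).1 ↔ x ∈ p.1 ∨ ∃ a ∈ l, Q a x := by
  intro l
  induction l with
  | nil =>
    intro _ p hp
    exact ⟨hp, fun x => by simp⟩
  | cons a l ih =>
    intro hstep p hp
    obtain ⟨h2, h1⟩ := hstep p a (List.mem_cons_self) hp
    rw [List.foldl_cons]
    obtain ⟨g2, g1⟩ := ih (fun p a ha hq => hstep p a (List.mem_cons_of_mem _ ha) hq) (f p a) h2
    refine ⟨g2, fun x => ?_⟩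
    rw [g1 x, h1 x]
    constructor
    · rintro ((h | h) | ⟨b, hb, hq⟩)
      · exact Or.inl h
      · exact Or.inr ⟨a, List.mem_cons_self, h⟩
      · exact Or.inr ⟨b, List.mem_cons_of_mem _ hb, hq⟩
    · rintro (h | ⟨b, hb, hq⟩)
      · exact Or.inl (Or.inl h)
      · rcases List.mem_cons.mp hb with rfl | hb'
        · exact Or.inl (Or.inr hq)
        · exact Or.inr ⟨b, hb', hq⟩

lemma pvReachM_spec (N : Int) : ∀ (fuel c : Nat), 1 ≤ c → c ≤ fuel →
    ∀ memo, pvGood N memo →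
    pvGood N (pvReachM N fuel c memo).2 ∧
      ∀ x : Int, x ∈ (pvReachM N fuel c memo).1 ↔ x ∈ pvReach N c := by
  intro fuel
  induction fuel with
  | zero => intro c h1 hc; omega
  | succ fuel ih =>
    intro c h1 hc memo hmemo
    show pvGood N (pvReachM N (fuel + 1) c memo).2 ∧ _
    rw [pvReachM]
    cases hg : memo.get? c with
    | some v => exact ⟨hmemo, fun x => hmemo c v hg x⟩
    | none =>
      have hstep : ∀ (p : PySem.Set Int × PySem.Dict Nat (PySem.Set Int)) (j : Nat),
          j ∈ List.range' 1 (c / 2) → pvGood N p.2 →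
          pvGood N (pvReachM N fuel (c - j) (pvReachM N fuel j p.2).2).2 ∧
            ∀ x : Int,
              x ∈ pvUnions p.1 (pvReachM N fuel j p.2).1
                    (pvReachM N fuel (c - j) (pvReachM N fuel j p.2).2).1 ↔
                x ∈ p.1 ∨ ∃ a ∈ pvReach N j, ∃ b ∈ pvReach N (c - j), pvOp2 a b x := by
        intro p j hj hp
        rcases List.mem_range'_1.mp hj with ⟨hj1, hj2⟩
        obtain ⟨hq2, hq1⟩ := ih j (by omega) (by omega) p.2 hp
        obtain ⟨hr2, hr1⟩ := ih (c - j) (by omega) (by omega) (pvReachM N fuel j p.2).2 hq2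
        refine ⟨hr2, fun x => ?_⟩
        rw [mem_pvUnions]
        exact or_congr Iff.rfl (exists_congr fun a =>
          and_congr (hq1 a) (exists_congr fun b => and_congr (hr1 b) Iff.rfl))
      obtain ⟨g2, g1⟩ := foldl_step_inv (pvGood N)
        (fun j x => ∃ a ∈ pvReach N j, ∃ b ∈ pvReach N (c - j), pvOp2 a b x)
        (fun p j =>
          (pvUnions p.1 (pvReachM N fuel j p.2).1
             (pvReachM N fuel (c - j) (pvReachM N fuel j p.2).2).1,
           (pvReachM N fuel (c - j) (pvReachM N fuel j p.2).2).2))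
        (List.range' 1 (c / 2)) hstep
        (PySem.Set.add PySem.Set.empty (pvConcat N c), memo) hmemo
      have hchar : ∀ x : Int,
          (x ∈ (PySem.Set.add PySem.Set.empty (pvConcat N c), memo).1 ∨
            ∃ j ∈ List.range' 1 (c / 2),
              ∃ a ∈ pvReach N j, ∃ b ∈ pvReach N (c - j), pvOp2 a b x) ↔
          x ∈ pvReach N c := by
        intro x
        rw [mem_pvReach]
        constructor
        · rintro (h | ⟨j, hj, a, ha, b, hb, hop | hop⟩)
          · left; simpa [PySem.Set.empty] using h
          · rcases List.mem_range'_1.mp hj with ⟨hb1, hb2⟩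
            exact Or.inr ⟨j, hb1, by omega, a, ha, b, hb, hop⟩
          · rcases List.mem_range'_1.mp hj with ⟨hb1, hb2⟩
            have e : c - (c - j) = j := by omega
            refine Or.inr ⟨c - j, by omega, by omega, b, hb, a, ?_, hop⟩
            rw [e]; exact ha
        · rintro (h | ⟨j, h1, h2, a, ha, b, hb, hop⟩)
          · left; simpa [PySem.Set.empty] using h
          · by_cases hhalf : j ≤ c / 2
            · exact Or.inr ⟨j, List.mem_range'_1.mpr ⟨h1, by omega⟩, a, ha, b, hb, Or.inl hop⟩
            · have e : c - (c - j) = j := by omega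
              refine Or.inr ⟨c - j, List.mem_range'_1.mpr ⟨by omega, by omega⟩, b, hb, a, ?_,
                Or.inr hop⟩
              rw [e]; exact ha
      exact ⟨pvGood_insert N c _ _ (fun x => (g1 x).trans (hchar x)) g2,
        fun x => (g1 x).trans (hchar x)⟩

lemma mem_si (N : Int) (S : Nat → List Int) (i : Nat)
    (hS : ∀ j, j < i → ∀ x : Int, x ∈ S j ↔ x ∈ pvReach N (j + 1))
    (init : PySem.Set Int) (hinit : ∀ x : Int, x ∈ init ↔ x = pvConcat N (i + 1)) (x : Int) :
    x ∈ (List.range i).foldl (fun acc j => pvCombine acc (S j) (S (i - j - 1))) init ↔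
      x ∈ pvReach N (i + 1) := by
  rw [mem_foldl_combine (fun j => S j) (fun j => S (i - j - 1)), mem_pvReach, hinit]
  constructor
  · rintro (h | ⟨j, hj, a, ha, b, hb, hop⟩)
    · exact Or.inl h
    · have hji : j < i := List.mem_range.mp hj
      refine Or.inr ⟨j + 1, by omega, by omega, a, ?_, b, ?_, hop⟩
      · exact (hS j hji a).mp ha
      · have e : i + 1 - (j + 1) = i - j - 1 + 1 := by omega
        rw [e]
        exact (hS (i - j - 1) (by omega) b).mp hb
  · rintro (h | ⟨j, h1, h2, a, ha, b, hb, hop⟩)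
    · exact Or.inl h
    · refine Or.inr ⟨j - 1, List.mem_range.mpr (by omega), a, ?_, b, ?_, hop⟩
      · have e : j - 1 + 1 = j := by omega
        rw [hS (j - 1) (by omega) a, e]; exact ha
      · have e : i - (j - 1) - 1 + 1 = i + 1 - j := by omega
        rw [hS (i - (j - 1) - 1) (by omega) b, e]; exact hb

lemma getD_set_invariant (s : List (PySem.Set Int)) (k m : Nat) (si : PySem.Set Int)
    (hs : s.length = 8) (hm : m < 8) :
    (s.set k si).getD m [] = if k = m then si else s.getD m [] := by
  have hm' : m < s.length := by omega
  have hm'' : m < (s.set k si).length := by simp [hs]; omega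
  rw [List.getD_eq_getElem _ _ hm'', List.getD_eq_getElem _ _ hm']
  rw [List.getElem_set]

-- the two search loops march in step: A at indices k..7, B at counts k+1..8
lemma loop_eq (N number : Int) : ∀ (n k : Nat) (s : List (PySem.Set Int))
    (memo : PySem.Dict Nat (PySem.Set Int)),
    k + n = 8 → 1 ≤ k → s.length = 8 → pvGood N memo →
    (∀ m, m < 8 → ∀ x : Int, x ∈ s.getD m [] ↔
        (if m < k then x ∈ pvReach N (m + 1) else x = pvConcat N (m + 1))) →
    pvALoop number s (List.range' k n) = pvBLoop N number memo (List.range' (k + 1) n) := by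
  intro n
  induction n with
  | zero => intro k s memo _ _ _ _ _; rfl
  | succ n ih =>
    intro k s memo hkn hk hlen hmemo hinv
    have hk8 : k < 8 := by omega
    have hSi : ∀ x : Int, x ∈ (List.range k).foldl
        (fun acc j => pvCombine acc (s.getD j []) (s.getD (k - j - 1) [])) (s.getD k []) ↔
        x ∈ pvReach N (k + 1) := by
      intro x
      apply mem_si N (fun j => s.getD j []) k
      · intro j hj y
        have h := hinv j (by omega) y
        rwa [if_pos hj] at h
      · intro y
        have h := hinv k (by omega) y
        rwa [if_neg (lt_irrefl k)] at h
    obtain ⟨hm2, hm1⟩ := pvReachM_spec N (k + 1) (k + 1) (by omega) (by omega) memo hmemo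
    rw [List.range'_succ, List.range'_succ]
    simp only [pvALoop, pvBLoop]
    by_cases hnum : number ∈ pvReach N (k + 1)
    · rw [if_pos ((hSi number).mpr hnum), if_pos ((hm1 number).mpr hnum)]
      push_cast
      ring
    · rw [if_neg (fun h => hnum ((hSi number).mp h)),
        if_neg (fun h => hnum ((hm1 number).mp h))]
      apply ih (k + 1)
      · omega
      · omega
      · simpa using hlen
      · exact hm2
      · intro m hm x
        rw [getD_set_invariant s k m _ hlen hm]
        by_cases hkm : k = m
        · subst hkm
          rw [if_pos rfl, if_pos (by omega)]
          exact hSi x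
        · rw [if_neg hkm]
          have h := hinv m hm x
          by_cases hmk : m < k
          · rw [if_pos hmk] at h
            rw [if_pos (by omega)]
            exact h
          · rw [if_neg hmk] at h
            rw [if_neg (by omega)]
            exact h

-- ===== VERDICT (by name: the statement is the Claim_ definition above) =====
theorem solution_spec : Claim_equal_solution := by
  intro N number _ _
  unfold Spec_solution
  have hreach1 : ∀ x : Int, x ∈ pvReach N 1 ↔ x = N := by
    intro x
    rw [mem_pvReach]
    constructor
    · rintro (h | ⟨j, h1, h2, _⟩)
      · rwa [pvConcat_one] at h
      · omega
    · intro h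
      exact Or.inl (by rwa [pvConcat_one])
  have hempty : pvGood N PySem.Dict.empty := by
    intro c v h x
    simp [PySem.Dict.get?_empty] at h
  obtain ⟨h1good, h1mem⟩ := pvReachM_spec N 1 1 (by omega) (by omega) PySem.Dict.empty hempty
  have hrange8 : List.range' 1 8 = 1 :: List.range' 2 7 := rfl
  unfold solution solution_alt
  rw [hrange8]
  simp only [pvBLoop]
  by_cases hN : N = number
  · rw [if_pos hN, if_pos ((h1mem number).mpr ((hreach1 number).mpr hN.symm))]
    rfl
  · rw [if_neg hN, if_neg (fun h => hN ((hreach1 number).mp ((h1mem number).mp h)).symm)]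
    apply loop_eq N number 7 1
    · omega
    · omega
    · simp
    · exact h1good
    · intro m hm x
      have hg : ((List.range 8).map
          (fun k => PySem.Set.add PySem.Set.empty (pvConcat N (k + 1)))).getD m [] =
          PySem.Set.add PySem.Set.empty (pvConcat N (m + 1)) := by
        rw [List.getD_eq_getElem _ _ (by simpa using hm)]
        simp
      rw [hg]
      by_cases hm1 : m < 1
      · have hm0 : m = 0 := by omega
        subst hm0
        rw [if_pos hm1]
        simp only [PySem.Set.empty, PySem.Set.mem_add, List.not_mem_nil, false_or]
        rw [hreach1 x, pvConcat_one]
      · rw [if_neg hm1]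
        simp [PySem.Set.empty]
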